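-- pv_equiv track=rewrite | github.com/Duy-Thong/I_learn_python | CodePTIT/PY01067.py | generate_ternary_numbers
-- ===== SOURCE A (Python) =====
-- from itertools import product
--
-- def generate_ternary_numbers(num):
--     n = 1
--     result = []
--     while len(result) < num:
--         for p in product('012', repeat=n):
--             if p.count('2') > n / 2:
--                 result.append(''.join(p))
--                 if len(result) == num:
--                     break
--         n += 1
--     return result
-- ===== SOURCE B (Python) =====
-- def generate_ternary_numbers(num):
--     # Pruned DFS: per length n, emit only strings whose remaining positions can
--     # still supply the required number of '2's; then cut the list to num.
--     result = []
--     n = 1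
--     while len(result) < num:
--         need = n // 2 + 1
--         block = []
--
--         def dfs(r, k, prefix):
--             if k > r:
--                 return
--             if r == 0:
--                 block.append(prefix)
--                 return
--             dfs(r - 1, k, prefix + '0')
--             dfs(r - 1, k, prefix + '1')
--             dfs(r - 1, k - 1 if k > 0 else 0, prefix + '2')
--
--         dfs(n, need, '')
--         result.extend(block)
--         n += 1
--     return result[:num]
-- ===== Notes on version B (the rewrite author's own statement) =====
-- stated objective: faster
-- what changed: Per length n, B generates the qualifying strings directly by a pruned depth-first search over the ternary digits (cutting every branch whose remaining positions cannot supply the still-needed majority digit) and truncates with a final slice, instead of A's exhaustive itertools.product enumeration of all length-n tuples filtered by count with a mid-loop break.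
import Mathlib
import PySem

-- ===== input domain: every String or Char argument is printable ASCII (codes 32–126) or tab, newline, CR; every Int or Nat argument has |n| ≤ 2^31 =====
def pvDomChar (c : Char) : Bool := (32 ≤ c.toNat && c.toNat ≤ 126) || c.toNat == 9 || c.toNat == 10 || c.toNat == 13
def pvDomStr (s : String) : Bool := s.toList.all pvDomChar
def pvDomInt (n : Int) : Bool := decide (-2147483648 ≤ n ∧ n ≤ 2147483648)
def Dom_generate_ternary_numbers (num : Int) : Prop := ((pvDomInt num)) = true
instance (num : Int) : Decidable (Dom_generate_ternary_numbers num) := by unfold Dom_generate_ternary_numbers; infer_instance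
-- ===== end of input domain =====

-- B replaces A's filtered exhaustive product(3^n strings per length) by a pruned DFS that
-- only descends where the remaining positions can still supply the needed '2's: faster (asymptotic).

-- ===== PORT A =====
-- itertools.product('012', repeat=n) in its order (leftmost digit varies slowest)
def pvProd : Nat → List (List Char)
  | 0 => [[]]
  | n + 1 => (['0', '1', '2'] : List Char).flatMap (fun c => (pvProd n).map (fun p => c :: p))

-- the inner `for p in product(...)` with the `break` when len(result)==num;
-- `p.count('2') > n / 2` is float comparison; exact iff 2*count > n for these integers
def pvInnerA (num : Int) (n : Nat) : List (List Char) → List String → List String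
  | [], res => res
  | p :: rest, res =>
    if 2 * p.count '2' > n then
      let res' := res ++ [String.ofList p]
      if (res'.length : Int) = num then res' else pvInnerA num n rest res'
    else pvInnerA num n rest res

-- the `while len(result) < num` loop; fuel num.toNat suffices because every length n
-- contributes at least one string ('2'*n), so Python performs at most num iterations
def pvLoopA (num : Int) : Nat → Nat → List String → List String
  | 0, _, res => res
  | fuel + 1, n, res =>
    if (res.length : Int) < num then pvLoopA num fuel (n + 1) (pvInnerA num n (pvProd n) res)
    else res

def generate_ternary_numbers (num : Int) : List String :=
  pvLoopA num num.toNat 1 []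

-- ===== PORT B =====
-- dfs(r, k, prefix): emit (in order) all extensions of prefix by r digits holding ≥ k '2's,
-- pruning when k > r
def pvDfs : Nat → Nat → List Char → List (List Char)
  | r, k, pre =>
    if k > r then []
    else
      match r with
      | 0 => [pre]
      | r' + 1 =>
        pvDfs r' k (pre ++ ['0']) ++ pvDfs r' k (pre ++ ['1']) ++
          pvDfs r' (k - 1) (pre ++ ['2'])

-- the `while len(result) < num` loop (same fuel argument as for A: each block is nonempty)
def pvLoopB (num : Int) : Nat → Nat → List String → List String
  | 0, _, res => res
  | fuel + 1, n, res =>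
    if (res.length : Int) < num then
      pvLoopB num fuel (n + 1) (res ++ (pvDfs n (n / 2 + 1) []).map (fun p => String.ofList p))
    else res

def generate_ternary_numbers_alt (num : Int) : List String :=
  PySem.List.slice (pvLoopB num num.toNat 1 []) none (some num)

-- ===== PRECONDITION & SPEC =====
def Spec_generate_ternary_numbers (num : Int) (out : List String) : Prop := out = generate_ternary_numbers_alt num
instance (num : Int) (out : List String) : Decidable (Spec_generate_ternary_numbers num out) := by unfold Spec_generate_ternary_numbers; infer_instance

-- ===== CLAIM (what is proved, stated in full; the proofs are below) =====
def Claim_equal_generate_ternary_numbers : Prop := ∀ (num : Int), Dom_generate_ternary_numbers num → Spec_generate_ternary_numbers num (generate_ternary_numbers num)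

-- ===== LEMMAS AND PROOFS =====

theorem pvProd_length {n : Nat} {p : List Char} (h : p ∈ pvProd n) : p.length = n := by
  induction n generalizing p with
  | zero => simp [pvProd] at h; simp [h]
  | succ n ih =>
    simp only [pvProd, List.mem_flatMap, List.mem_map] at h
    obtain ⟨c, -, q, hq, rfl⟩ := h
    simp [ih hq]

-- the pruned DFS produces exactly the filtered product, prefixed
theorem pvDfs_eq (r : Nat) : ∀ (k : Nat) (pre : List Char),
    pvDfs r k pre = ((pvProd r).filter (fun p => decide (k ≤ p.count '2'))).map (fun p => pre ++ p) := by
  induction r with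
  | zero =>
    intro k pre
    rcases k with _ | k <;> simp [pvDfs, pvProd]
  | succ r ih =>
    intro k pre
    by_cases hk : k > r + 1
    · rw [pvDfs]
      simp only [hk, if_true]
      rw [List.filter_eq_nil_iff.2, List.map_nil]
      intro p hp
      have := pvProd_length hp
      have hc : p.count '2' ≤ p.length := List.count_le_length
      simp only [decide_eq_true_eq]
      omega
    · rw [pvDfs]
      simp only [hk, if_false]
      rw [ih k (pre ++ ['0']), ih k (pre ++ ['1']), ih (k - 1) (pre ++ ['2'])]
      have fne : ∀ c : Char, c ≠ '2' →
          List.filter (fun p => decide (k ≤ List.count '2' p)) ((pvProd r).map (fun p => c :: p))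
            = ((pvProd r).filter (fun p => decide (k ≤ List.count '2' p))).map (fun p => c :: p) := by
        intro c hc
        rw [List.filter_map]
        congr 1
        apply List.filter_congr
        intro p _
        simp [hc]
      have f2 : List.filter (fun p => decide (k ≤ List.count '2' p)) ((pvProd r).map (fun p => '2' :: p))
          = ((pvProd r).filter (fun p => decide (k - 1 ≤ List.count '2' p))).map (fun p => '2' :: p) := by
        rw [List.filter_map]
        congr 1
        apply List.filter_congr
        intro p _
        simp only [Function.comp_def, List.count_cons_self, decide_eq_decide]
        omega
      conv_rhs => rw [pvProd]
      simp only [List.flatMap_cons, List.flatMap_nil, List.append_nil, List.filter_append,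
        fne '0' (by decide), fne '1' (by decide), f2, List.map_append, List.map_map]
      simp [Function.comp_def, List.append_assoc]

-- the two per-length membership conditions agree
theorem pvCond_eq (n : Nat) (p : List Char) :
    (decide (2 * p.count '2' > n)) = (decide (n / 2 + 1 ≤ p.count '2')) := by
  simp only [decide_eq_decide]
  omega

-- the inner for-loop with its break is `take num` of appending all matches
theorem pvInnerA_eq (num : Int) (n : Nat) :
    ∀ (L : List (List Char)) (res : List String), res.length < num.toNat →
      pvInnerA num n L res =
        (res ++ (L.filter (fun p => decide (2 * p.count '2' > n))).map (fun p => String.ofList p)).take num.toNat := by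
  intro L
  induction L with
  | nil =>
    intro res h
    rw [pvInnerA, List.filter_nil, List.map_nil, List.append_nil,
      List.take_of_length_le (Nat.le_of_lt h)]
  | cons p rest ih =>
    intro res h
    have hnum : (num.toNat : Int) = num := by omega
    rw [pvInnerA]
    by_cases hc : 2 * p.count '2' > n
    · simp only [hc, if_true]
      by_cases he : ((res ++ [String.ofList p]).length : Int) = num
      · simp only [he, if_true]
        have hlen : (res ++ [String.ofList p]).length = num.toNat := by
          simp at he ⊢; omega
        rw [List.filter_cons_of_pos (by simpa using hc), List.map_cons,
          show res ++ String.ofList p :: (rest.filter (fun p => decide (2 * p.count '2' > n))).map (fun p => String.ofList p)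
             = (res ++ [String.ofList p]) ++ (rest.filter (fun p => decide (2 * p.count '2' > n))).map (fun p => String.ofList p) by simp,
          ← hlen, List.take_left]
      · simp only [he, if_false]
        have hlt : (res ++ [String.ofList p]).length < num.toNat := by
          simp at he ⊢; omega
        rw [ih _ hlt, List.filter_cons_of_pos (by simpa using hc), List.map_cons]
        congr 1
        simp
    · simp only [hc, if_false]
      rw [ih _ h, List.filter_cons_of_neg (by simpa using hc)]

-- main loop correspondence: A's truncated state tracks B's full state under `take`
theorem pvLoop_eq (num : Int) : ∀ (fuel n : Nat) (res : List String),
    pvLoopA num fuel n (res.take num.toNat) = (pvLoopB num fuel n res).take num.toNat := by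
  intro fuel
  induction fuel with
  | zero => intro n res; rfl
  | succ f ih =>
    intro n res
    have hlen : (res.take num.toNat).length = min num.toNat res.length := by simp
    by_cases hb : (res.length : Int) < num
    · have hres : res.length < num.toNat := by omega
      have htk : res.take num.toNat = res := List.take_of_length_le (Nat.le_of_lt hres)
      have ha : ((res.take num.toNat).length : Int) < num := by rw [htk]; exact hb
      rw [pvLoopA, pvLoopB, if_pos ha, if_pos hb, htk,
        pvInnerA_eq num n (pvProd n) res hres]
      have hblock : (pvDfs n (n / 2 + 1) []).map (fun p => String.ofList p)
          = ((pvProd n).filter (fun p => decide (2 * p.count '2' > n))).map (fun p => String.ofList p) := by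
        rw [pvDfs_eq]
        simp only [List.map_map]
        congr 1
        exact List.filter_congr (fun p _ => (pvCond_eq n p).symm)
      rw [← hblock]
      exact ih (n + 1) (res ++ (pvDfs n (n / 2 + 1) []).map (fun p => String.ofList p))
    · have ha : ¬ ((res.take num.toNat).length : Int) < num := by
        rw [hlen]; intro hcon; apply hb
        by_cases h0 : 0 ≤ num
        · have : (num.toNat : Int) = num := by omega
          omega
        · omega
      rw [pvLoopA, pvLoopB, if_neg ha, if_neg hb]

-- ===== VERDICT (by name: the statement is the Claim_ definition above) =====
theorem generate_ternary_numbers_spec : Claim_equal_generate_ternary_numbers := by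
  intro num _
  show generate_ternary_numbers num = generate_ternary_numbers_alt num
  unfold generate_ternary_numbers generate_ternary_numbers_alt
  have h := pvLoop_eq num num.toNat 1 []
  rw [List.take_nil] at h
  rw [h]
  by_cases h0 : 0 ≤ num
  · rw [PySem.List.slice_to _ h0]
  · have : num.toNat = 0 := by omega
    rw [this]
    simp [pvLoopB, PySem.List.slice]
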